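-- pv_equiv track=rewrite | github.com/UTAHOGA/HUNT-PLANNER | scripts/build-hunt-database-complete.py | summarize_engine
-- ===== SOURCE A (Python) =====
-- from collections import Counter, defaultdict
--
-- def clean(value: object) -> str:
--     return str(value or "").strip()
--
-- def residency_key(value: object) -> str:
--     text = clean(value).lower()
--     return "Nonresident" if text == "nonresident" else "Resident"
--
-- def summarize_engine(rows: list[dict[str, str]]) -> dict[tuple[str, str], dict[str, str]]:
--     by_key: dict[tuple[str, str], dict[str, str]] = {}
--     grouped: dict[tuple[str, str], list[dict[str, str]]] = defaultdict(list)
--     for row in rows: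
--         hunt_code = clean(row.get("hunt_code"))
--         residency = residency_key(row.get("residency"))
--         if not hunt_code:
--             continue
--         grouped[(hunt_code, residency)].append(row)
--
--     for key, group in grouped.items():
--         first = group[0]
--         points = sorted(
--             {
--                 int(clean(row.get("points")))
--                 for row in group
--                 if clean(row.get("points"))
--             }
--         )
--         by_key[key] = {
--             "has_engine_model": "TRUE",
--             "engine_point_rows": str(len(group)),
--             "modeled_min_points": str(points[0]) if points else "",
--             "modeled_max_points": str(points[-1]) if points else "",
--             "public_permits_2025": clean(first.get("public_permits_2025")),
--             "public_permits_2026": clean(first.get("public_permits_2026")),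
--             "projected_applicants_2026": str(sum(int(clean(row.get("applicants_at_level")) or "0") for row in group)),
--             "max_point_permits_2026": clean(first.get("max_point_permits_2026")),
--             "random_permits_2026": clean(first.get("random_permits_2026")),
--             "guaranteed_at_2026": clean(first.get("guaranteed_at_2026")),
--             "delta_gap": clean(first.get("delta_gap")),
--             "trend": clean(first.get("trend")),
--         }
--     return by_key
-- ===== SOURCE B (Python) =====
-- def clean(value: object) -> str:
--     return str(value or "").strip()
--
--
-- def residency_key(value: object) -> str:
--     text = clean(value).lower()
--     return "Nonresident" if text == "nonresident" else "Resident"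
--
--
-- def summarize_engine(rows: list[dict[str, str]]) -> dict[tuple[str, str], dict[str, str]]:
--     # single pass: key -> [count, applicants_sum, min_pts or None, max_pts or None, first_row]
--     acc: dict[tuple[str, str], list] = {}
--     for row in rows:
--         hunt_code = clean(row.get("hunt_code"))
--         if not hunt_code:
--             continue
--         key = (hunt_code, residency_key(row.get("residency")))
--         p = clean(row.get("points"))
--         pv = int(p) if p else None
--         av = int(clean(row.get("applicants_at_level")) or "0")
--         e = acc.get(key)
--         if e is None:
--             acc[key] = [1, av, pv, pv, row]
--         else:
--             e[0] += 1
--             e[1] += av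
--             if pv is not None:
--                 e[2] = pv if e[2] is None else min(e[2], pv)
--                 e[3] = pv if e[3] is None else max(e[3], pv)
--     return {
--         key: {
--             "has_engine_model": "TRUE",
--             "engine_point_rows": str(count),
--             "modeled_min_points": "" if mn is None else str(mn),
--             "modeled_max_points": "" if mx is None else str(mx),
--             "public_permits_2025": clean(first.get("public_permits_2025")),
--             "public_permits_2026": clean(first.get("public_permits_2026")),
--             "projected_applicants_2026": str(appl),
--             "max_point_permits_2026": clean(first.get("max_point_permits_2026")),
--             "random_permits_2026": clean(first.get("random_permits_2026")),
--             "guaranteed_at_2026": clean(first.get("guaranteed_at_2026")),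
--             "delta_gap": clean(first.get("delta_gap")),
--             "trend": clean(first.get("trend")),
--         }
--         for key, (count, appl, mn, mx, first) in acc.items()
--     }
-- ===== Notes on version B (the rewrite author's own statement) =====
-- stated objective: alternative
-- what changed: Replaces A's two-pass scheme (defaultdict grouping rows into per-key lists, then a per-group pass doing len/sorted-set-min-max/sum) with a single pass over the rows maintaining per-key running count, applicant sum, min/max points and the first row, formatted at the end.
import Mathlib
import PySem

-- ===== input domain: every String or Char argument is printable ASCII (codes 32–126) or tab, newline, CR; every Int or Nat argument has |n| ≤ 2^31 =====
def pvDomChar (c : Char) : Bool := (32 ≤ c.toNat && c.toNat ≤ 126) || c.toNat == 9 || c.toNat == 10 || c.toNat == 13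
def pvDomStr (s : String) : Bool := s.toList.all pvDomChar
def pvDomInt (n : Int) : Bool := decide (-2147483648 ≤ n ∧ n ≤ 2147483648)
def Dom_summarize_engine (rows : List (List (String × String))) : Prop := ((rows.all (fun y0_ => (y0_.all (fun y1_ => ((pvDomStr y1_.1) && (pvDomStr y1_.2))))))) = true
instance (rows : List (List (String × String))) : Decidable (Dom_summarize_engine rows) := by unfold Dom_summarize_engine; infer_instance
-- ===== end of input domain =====

-- B replaces A's two-pass scheme (dict of row-lists, then per-group len/set/sorted/sum passes)
-- by a single pass keeping per-key running count, applicant sum, min/max points and first row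
-- (objective: simpler/alternative; return-value equivalence only — neither mutates its input).

-- ===== PORT A =====
-- shared helpers: row.get(k), clean(...), residency_key(...), and the two int parses
def pvGet (row : List (String × String)) (k : String) : Option String :=
  (PySem.Dict.mk row).get? k

def pvClean (v : Option String) : String := PySem.Str.strip (v.getD "")

def pvResidency (v : Option String) : String :=
  if PySem.Str.lower (pvClean v) = "nonresident" then "Nonresident" else "Resident"

-- int(clean(row.get("points"))) under the "if clean(...)" guard (none when the guard skips)
def pvPts (row : List (String × String)) : Option Int :=
  let p := pvClean (pvGet row "points")
  if p = "" then none else some ((PySem.Int.ofStr? p).getD 0)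

-- int(clean(row.get("applicants_at_level")) or "0")
def pvAppl (row : List (String × String)) : Int :=
  let c := pvClean (pvGet row "applicants_at_level")
  (PySem.Int.ofStr? (if c = "" then "0" else c)).getD 0

-- A's grouping-loop body
def pvGroupStep (g : PySem.Dict (String × String) (List (List (String × String))))
    (row : List (String × String)) : PySem.Dict (String × String) (List (List (String × String))) :=
  let hunt_code := pvClean (pvGet row "hunt_code")
  let residency := pvResidency (pvGet row "residency")
  if hunt_code = "" then g
  else g.modify (hunt_code, residency) [] (fun l => l ++ [row])

-- A's per-group summary dict
def pvSummaryA (group : List (List (String × String))) : List (String × String) :=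
  let first := group.headD []
  let points := PySem.List.sorted (PySem.Set.ofList (group.filterMap pvPts)) (fun x => x) false
  [("has_engine_model", "TRUE"),
   ("engine_point_rows", PySem.Int.toStr (group.length : Int)),
   ("modeled_min_points", match PySem.List.pyGet? points 0 with | none => "" | some v => PySem.Int.toStr v),
   ("modeled_max_points", match PySem.List.pyGet? points (-1) with | none => "" | some v => PySem.Int.toStr v),
   ("public_permits_2025", pvClean (pvGet first "public_permits_2025")),
   ("public_permits_2026", pvClean (pvGet first "public_permits_2026")),
   ("projected_applicants_2026", PySem.Int.toStr (group.foldl (fun s row => s + pvAppl row) 0)),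
   ("max_point_permits_2026", pvClean (pvGet first "max_point_permits_2026")),
   ("random_permits_2026", pvClean (pvGet first "random_permits_2026")),
   ("guaranteed_at_2026", pvClean (pvGet first "guaranteed_at_2026")),
   ("delta_gap", pvClean (pvGet first "delta_gap")),
   ("trend", pvClean (pvGet first "trend"))]

def summarize_engine (rows : List (List (String × String))) : List (String × String × List (String × String)) :=
  let grouped := rows.foldl pvGroupStep PySem.Dict.empty
  (grouped.items).map (fun kg => (kg.1.1, kg.1.2, pvSummaryA kg.2))

-- ===== PORT B =====
-- B's accumulator entry: (count, applicants_sum, min_pts, max_pts, first_row)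
abbrev PvAcc : Type := Int × Int × Option Int × Option Int × List (String × String)

-- e[2] = pv if e[2] is None else min(e[2], pv)  (guarded by "if pv is not None")
def pvUpdMin (mn : Option Int) (pv : Option Int) : Option Int :=
  match pv with
  | none => mn
  | some v => match mn with | none => some v | some m => some (min m v)

def pvUpdMax (mx : Option Int) (pv : Option Int) : Option Int :=
  match pv with
  | none => mx
  | some v => match mx with | none => some v | some m => some (max m v)

-- acc[key] = [1, av, pv, pv, row]   (first sighting of key)
def pvIni (row : List (String × String)) : PvAcc := (1, pvAppl row, pvPts row, pvPts row, row)

-- the in-place update of an existing entry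
def pvUpd (e : PvAcc) (row : List (String × String)) : PvAcc :=
  (e.1 + 1, e.2.1 + pvAppl row, pvUpdMin e.2.2.1 (pvPts row), pvUpdMax e.2.2.2.1 (pvPts row), e.2.2.2.2)

-- B's single-pass loop body
def pvStepB (acc : PySem.Dict (String × String) PvAcc) (row : List (String × String)) :
    PySem.Dict (String × String) PvAcc :=
  let hunt_code := pvClean (pvGet row "hunt_code")
  if hunt_code = "" then acc
  else
    let key := (hunt_code, pvResidency (pvGet row "residency"))
    match acc.get? key with
    | none => acc.insert key (pvIni row)
    | some e => acc.insert key (pvUpd e row)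

-- B's final formatting of one accumulator entry
def pvFmtB (e : PvAcc) : List (String × String) :=
  let first := e.2.2.2.2
  [("has_engine_model", "TRUE"),
   ("engine_point_rows", PySem.Int.toStr e.1),
   ("modeled_min_points", match e.2.2.1 with | none => "" | some v => PySem.Int.toStr v),
   ("modeled_max_points", match e.2.2.2.1 with | none => "" | some v => PySem.Int.toStr v),
   ("public_permits_2025", pvClean (pvGet first "public_permits_2025")),
   ("public_permits_2026", pvClean (pvGet first "public_permits_2026")),
   ("projected_applicants_2026", PySem.Int.toStr e.2.1),
   ("max_point_permits_2026", pvClean (pvGet first "max_point_permits_2026")),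
   ("random_permits_2026", pvClean (pvGet first "random_permits_2026")),
   ("guaranteed_at_2026", pvClean (pvGet first "guaranteed_at_2026")),
   ("delta_gap", pvClean (pvGet first "delta_gap")),
   ("trend", pvClean (pvGet first "trend"))]

def summarize_engine_alt (rows : List (List (String × String))) : List (String × String × List (String × String)) :=
  let acc := rows.foldl pvStepB PySem.Dict.empty
  (acc.items).map (fun ke => (ke.1.1, ke.1.2, pvFmtB ke.2))

-- ===== PRECONDITION & SPEC =====
-- Pre_ excludes exactly the inputs where Python A raises ValueError: a grouped row (nonempty
-- hunt_code) whose cleaned "points" or "applicants_at_level" text is not a valid int literal.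
def Pre_summarize_engine (rows : List (List (String × String))) : Prop :=
  ∀ row ∈ rows, pvClean (pvGet row "hunt_code") = "" ∨
    ((pvClean (pvGet row "points") = "" ∨ (PySem.Int.ofStr? (pvClean (pvGet row "points"))).isSome = true) ∧
     ((PySem.Int.ofStr? (if pvClean (pvGet row "applicants_at_level") = "" then "0" else pvClean (pvGet row "applicants_at_level"))).isSome = true))
instance (rows : List (List (String × String))) : Decidable (Pre_summarize_engine rows) := by
  unfold Pre_summarize_engine; infer_instance

def pvWitness_summarize_engine : (List (List (String × String))) :=
  [[("hunt_code", "E-001"), ("residency", "NonResident "), ("points", " 3"), ("applicants_at_level", "12")],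
   [("hunt_code", "E-001"), ("residency", "nonresident"), ("points", "1"), ("applicants_at_level", "")],
   [("hunt_code", ""), ("points", "zzz")]]

def Spec_summarize_engine (rows : List (List (String × String))) (out : List (String × String × List (String × String))) : Prop := out = summarize_engine_alt rows
instance (rows : List (List (String × String))) (out : List (String × String × List (String × String))) : Decidable (Spec_summarize_engine rows out) := by unfold Spec_summarize_engine; infer_instance

-- ===== CLAIM (what is proved, stated in full; the proofs are below) =====
def Claim_equal_summarize_engine : Prop := ∀ (rows : List (List (String × String))), Dom_summarize_engine rows → Pre_summarize_engine rows → Spec_summarize_engine rows (summarize_engine rows)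

-- ===== LEMMAS AND PROOFS =====

-- the aggregate B's accumulator holds for a group A has collected
def pvAgg (g : List (List (String × String))) : PvAcc :=
  match g with
  | [] => (0, 0, none, none, [])
  | f :: rest => rest.foldl pvUpd (pvIni f)

def pvMirror (d : PySem.Dict (String × String) (List (List (String × String)))) :
    PySem.Dict (String × String) PvAcc :=
  PySem.Dict.mk (d.items.map (fun p => (p.1, pvAgg p.2)))

lemma pvGet?_mirror (d : PySem.Dict (String × String) (List (List (String × String))))
    (k : String × String) : (pvMirror d).get? k = (d.get? k).map pvAgg := by
  obtain ⟨l⟩ := d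
  induction l with
  | nil => rfl
  | cons p rest ih =>
    obtain ⟨pk, pv⟩ := p
    simp only [pvMirror, List.map_cons, PySem.Dict.get?_mk_cons] at *
    split_ifs with h
    · rfl
    · exact ih

lemma pvContains_mirror (d : PySem.Dict (String × String) (List (List (String × String))))
    (k : String × String) : (pvMirror d).contains k = d.contains k := by
  simp [pvMirror, PySem.Dict.contains, List.any_map, Function.comp_def]

lemma pvInsert_mirror (d : PySem.Dict (String × String) (List (List (String × String))))
    (k : String × String) (g : List (List (String × String))) :
    pvMirror (d.insert k g) = (pvMirror d).insert k (pvAgg g) := by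
  unfold PySem.Dict.insert
  rw [pvContains_mirror]
  cases h : d.contains k
  · simp [pvMirror]
  · apply PySem.Dict.ext
    simp only [pvMirror, if_true, List.map_map]
    apply List.map_congr_left
    intro p _
    by_cases hp : p.1 == k
    · simp [Function.comp, hp]
    · simp [Function.comp, hp]

lemma pvAgg_append (g : List (List (String × String))) (r : List (String × String)) (h : g ≠ []) :
    pvAgg (g ++ [r]) = pvUpd (pvAgg g) r := by
  cases g with
  | nil => exact absurd rfl h
  | cons f rest => simp [pvAgg, List.foldl_append]

def pvNE (d : PySem.Dict (String × String) (List (List (String × String)))) : Prop :=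
  ∀ p ∈ d.items, p.2 ≠ []

lemma pvNE_insert (d : PySem.Dict (String × String) (List (List (String × String))))
    (k : String × String) (g : List (List (String × String))) (hd : pvNE d) (hg : g ≠ []) :
    pvNE (d.insert k g) := by
  intro p hp
  rcases (PySem.Dict.mem_items_insert d k g p).1 hp with h | ⟨h, _⟩
  · rw [h]; exact hg
  · exact hd p h

lemma pvNE_get? (d : PySem.Dict (String × String) (List (List (String × String))))
    (k : String × String) (g : List (List (String × String))) (hd : pvNE d)
    (h : d.get? k = some g) : g ≠ [] := by
  simp only [PySem.Dict.get?, Option.map_eq_some_iff] at h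
  obtain ⟨p, hp, hpe⟩ := h
  exact hpe ▸ hd p (List.mem_of_find?_eq_some hp)

lemma pvStep_mirror (d : PySem.Dict (String × String) (List (List (String × String))))
    (row : List (String × String)) (hd : pvNE d) :
    pvStepB (pvMirror d) row = pvMirror (pvGroupStep d row) ∧ pvNE (pvGroupStep d row) := by
  unfold pvStepB pvGroupStep
  by_cases hc : pvClean (pvGet row "hunt_code") = ""
  · simp only [hc, if_true]
    exact ⟨trivial, hd⟩
  · simp only [hc, if_false, PySem.Dict.modify, pvGet?_mirror]
    cases hg : d.get? (pvClean (pvGet row "hunt_code"), pvResidency (pvGet row "residency")) with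
    | none =>
      rw [PySem.Dict.getD_of_get?_eq_none d [] hg]
      simp only [Option.map_none]
      refine ⟨?_, pvNE_insert d _ _ hd (by simp)⟩
      rw [pvInsert_mirror]
      rfl
    | some g =>
      rw [PySem.Dict.getD_of_get?_eq_some d [] hg]
      simp only [Option.map_some]
      refine ⟨?_, pvNE_insert d _ _ hd (by simp)⟩
      rw [pvInsert_mirror, pvAgg_append g row (pvNE_get? d _ g hd hg)]

lemma pvFold_mirror (rows : List (List (String × String))) :
    ∀ d, pvNE d →
      rows.foldl pvStepB (pvMirror d) = pvMirror (rows.foldl pvGroupStep d) ∧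
      pvNE (rows.foldl pvGroupStep d) := by
  induction rows with
  | nil => exact fun d hd => ⟨rfl, hd⟩
  | cons row rest ih =>
    intro d hd
    obtain ⟨h1, h2⟩ := pvStep_mirror d row hd
    simp only [List.foldl_cons, h1]
    exact ih _ h2

lemma pvFoldUpd (rest : List (List (String × String))) :
    ∀ e : PvAcc, rest.foldl pvUpd e =
      (e.1 + rest.length, e.2.1 + (rest.map pvAppl).sum,
       rest.foldl (fun o x => pvUpdMin o (pvPts x)) e.2.2.1,
       rest.foldl (fun o x => pvUpdMax o (pvPts x)) e.2.2.2.1, e.2.2.2.2) := by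
  induction rest with
  | nil => intro e; simp
  | cons x t ih =>
    intro e
    rw [List.foldl_cons, ih (pvUpd e x)]
    simp only [pvUpd, List.length_cons, List.map_cons, List.sum_cons, Prod.mk.injEq]
    repeat' apply And.intro
    all_goals first
      | rfl
      | trivial
      | (push_cast; ring)

lemma pvMinFold_filterMap (g : List (List (String × String))) :
    ∀ o : Option Int, g.foldl (fun o x => pvUpdMin o (pvPts x)) o =
      (g.filterMap pvPts).foldl (fun o v => pvUpdMin o (some v)) o := by
  induction g with
  | nil => intro o; rfl
  | cons x t ih =>
    intro o
    cases h : pvPts x with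
    | none =>
      simpa only [List.foldl_cons, List.filterMap_cons, h,
        show ∀ o : Option Int, pvUpdMin o none = o from fun _ => rfl] using ih o
    | some v =>
      simpa only [List.foldl_cons, List.filterMap_cons, h] using ih (pvUpdMin o (some v))

lemma pvMaxFold_filterMap (g : List (List (String × String))) :
    ∀ o : Option Int, g.foldl (fun o x => pvUpdMax o (pvPts x)) o =
      (g.filterMap pvPts).foldl (fun o v => pvUpdMax o (some v)) o := by
  induction g with
  | nil => intro o; rfl
  | cons x t ih =>
    intro o
    cases h : pvPts x with
    | none =>
      simpa only [List.foldl_cons, List.filterMap_cons, h,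
        show ∀ o : Option Int, pvUpdMax o none = o from fun _ => rfl] using ih o
    | some v =>
      simpa only [List.foldl_cons, List.filterMap_cons, h] using ih (pvUpdMax o (some v))

lemma pvMinFold_char (t : List Int) :
    ∀ m : Int, t.foldl (fun o v => pvUpdMin o (some v)) (some m) = some (t.foldl min m) := by
  induction t with
  | nil => intro m; rfl
  | cons v t ih => intro m; simpa [pvUpdMin] using ih (min m v)

lemma pvMaxFold_char (t : List Int) :
    ∀ m : Int, t.foldl (fun o v => pvUpdMax o (some v)) (some m) = some (t.foldl max m) := by
  induction t with
  | nil => intro m; rfl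
  | cons v t ih => intro m; simpa [pvUpdMax] using ih (max m v)

lemma pvPyGet_neg_one (l : List Int) (h : l ≠ []) : PySem.List.pyGet? l (-1) = l.getLast? := by
  have hl : 1 ≤ l.length := List.length_pos_iff.2 h
  simp [PySem.List.pyGet?, PySem.List.pyIdx?, hl, List.getLast?_eq_getElem?]

lemma pvPairwise_getLast {l : List Int} (h : l.Pairwise (· ≤ ·)) {M : Int}
    (hM : l.getLast? = some M) : ∀ x ∈ l, x ≤ M := by
  have hrev : l.reverse.Pairwise (fun a b => b ≤ a) := List.pairwise_reverse.2 h
  rw [← List.head?_reverse] at hM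
  cases hr : l.reverse with
  | nil => rw [hr] at hM; simp at hM
  | cons a t =>
    rw [hr] at hM
    simp only [List.head?_cons, Option.some.injEq] at hM
    subst hM
    intro x hx
    have hx' : x ∈ l.reverse := List.mem_reverse.2 hx
    rw [hr] at hx' hrev
    rcases List.mem_cons.1 hx' with rfl | hx''
    · exact le_refl _
    · exact List.rel_of_pairwise_cons hrev hx''

-- the head of sorted(set(pts)) is the running minimum of pts
lemma pvMin_head (pts : List Int) (hp : pts ≠ []) :
    PySem.List.pyGet? (PySem.List.sorted (PySem.Set.ofList pts) (fun x => x) false) 0 =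
      pts.foldl (fun o v => pvUpdMin o (some v)) none := by
  cases pts with
  | nil => exact absurd rfl hp
  | cons hd t =>
    simp only [List.foldl_cons]
    show _ = t.foldl (fun o v => pvUpdMin o (some v)) (some hd)
    rw [pvMinFold_char]
    have hset : PySem.Set.ofList (hd :: t) ≠ [] := by
      intro he
      have := (PySem.Set.mem_ofList (hd :: t) hd).2 List.mem_cons_self
      simp [he] at this
    cases hs : PySem.List.sorted (PySem.Set.ofList (hd :: t)) (fun x => x) false with
    | nil => exact absurd ((PySem.List.sorted_eq_nil_iff _ _ _).1 hs) hset
    | cons m tail =>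
      simp only [PySem.List.pyGet?, PySem.List.pyIdx?]
      norm_num
      set b := t.foldl min hd with hb
      have hbmem : b ∈ hd :: t := PySem.List.min?_mem (PySem.List.min?_id_cons hd t)
      have hbmin : ∀ y ∈ hd :: t, b ≤ y := PySem.List.min?_isMin (PySem.List.min?_id_cons hd t)
      have hm_le : ∀ y ∈ PySem.Set.ofList (hd :: t), m ≤ y :=
        PySem.List.key_head_sorted_le _ (fun x => x) hs
      have hm_mem : m ∈ hd :: t := by
        have : m ∈ PySem.List.sorted (PySem.Set.ofList (hd :: t)) (fun x => x) false := by
          rw [hs]; exact List.mem_cons_self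
        exact (PySem.Set.mem_ofList _ _).1 ((PySem.List.mem_sorted _ _ _ _).1 this)
      exact le_antisymm (hm_le b ((PySem.Set.mem_ofList _ _).2 hbmem)) (hbmin m hm_mem)

-- the last element of sorted(set(pts)) is the running maximum of pts
lemma pvMax_last (pts : List Int) (hp : pts ≠ []) :
    PySem.List.pyGet? (PySem.List.sorted (PySem.Set.ofList pts) (fun x => x) false) (-1) =
      pts.foldl (fun o v => pvUpdMax o (some v)) none := by
  cases pts with
  | nil => exact absurd rfl hp
  | cons hd t =>
    simp only [List.foldl_cons]
    show _ = t.foldl (fun o v => pvUpdMax o (some v)) (some hd)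
    rw [pvMaxFold_char]
    have hset : PySem.Set.ofList (hd :: t) ≠ [] := by
      intro he
      have := (PySem.Set.mem_ofList (hd :: t) hd).2 List.mem_cons_self
      simp [he] at this
    set s := PySem.List.sorted (PySem.Set.ofList (hd :: t)) (fun x => x) false with hs
    have hsne : s ≠ [] := fun he => hset ((PySem.List.sorted_eq_nil_iff _ _ _).1 he)
    rw [pvPyGet_neg_one s hsne]
    cases hM : s.getLast? with
    | none => exact absurd (List.getLast?_eq_none_iff.1 hM) hsne
    | some M =>
      set b := t.foldl max hd with hb
      have hbmem : b ∈ hd :: t := PySem.List.max?_mem (PySem.List.max?_id_cons hd t)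
      have hbmax : ∀ y ∈ hd :: t, y ≤ b := PySem.List.max?_isMax (PySem.List.max?_id_cons hd t)
      have hpw : s.Pairwise (· ≤ ·) := PySem.List.sorted_pairwise _ (fun x => x)
      have hM_ge : ∀ x ∈ s, x ≤ M := pvPairwise_getLast hpw hM
      have hM_mem : M ∈ hd :: t :=
        (PySem.Set.mem_ofList _ _).1 ((PySem.List.mem_sorted _ _ _ _).1 (List.mem_of_getLast? hM))
      have hb_mem_s : b ∈ s :=
        (PySem.List.mem_sorted _ _ _ _).2 ((PySem.Set.mem_ofList _ _).2 hbmem)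
      exact congrArg some (le_antisymm (hbmax M hM_mem) (hM_ge b hb_mem_s))

lemma pvFmt_eq (g : List (List (String × String))) (h : g ≠ []) :
    pvFmtB (pvAgg g) = pvSummaryA g := by
  cases g with
  | nil => exact absurd rfl h
  | cons f rest =>
    have hagg : pvAgg (f :: rest) = rest.foldl pvUpd (pvIni f) := rfl
    unfold pvFmtB pvSummaryA
    rw [hagg, pvFoldUpd rest (pvIni f)]
    simp only [pvIni]
    have hmin : rest.foldl (fun o x => pvUpdMin o (pvPts x)) (pvPts f) =
        (f :: rest).foldl (fun o x => pvUpdMin o (pvPts x)) none := by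
      simp only [List.foldl_cons]
      cases hf : pvPts f <;> simp [pvUpdMin]
    have hmax : rest.foldl (fun o x => pvUpdMax o (pvPts x)) (pvPts f) =
        (f :: rest).foldl (fun o x => pvUpdMax o (pvPts x)) none := by
      simp only [List.foldl_cons]
      cases hf : pvPts f <;> simp [pvUpdMax]
    have hcount : (1 : Int) + (rest.length : Int) = ((f :: rest).length : Int) := by
      push_cast [List.length_cons]; ring
    have hsum : pvAppl f + (rest.map pvAppl).sum =
        (f :: rest).foldl (fun s row => s + pvAppl row) 0 := by
      rw [PySem.List.foldl_add]; simp
    by_cases hpts : (f :: rest).filterMap pvPts = []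
    · rw [hcount, hsum, hmin, hmax, pvMinFold_filterMap, pvMaxFold_filterMap, hpts]
      rfl
    · rw [hcount, hsum, hmin, hmax, pvMinFold_filterMap, pvMaxFold_filterMap,
        ← pvMin_head _ hpts, ← pvMax_last _ hpts]
      rfl
-- ===== VERDICT (by name: the statement is the Claim_ definition above) =====
theorem summarize_engine_spec : Claim_equal_summarize_engine := by
  intro rows _ _
  unfold Spec_summarize_engine summarize_engine summarize_engine_alt
  obtain ⟨hf, hne⟩ := pvFold_mirror rows PySem.Dict.empty (by intro p hp; simp [PySem.Dict.empty] at hp)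
  have hempty : (PySem.Dict.empty : PySem.Dict (String × String) PvAcc) = pvMirror PySem.Dict.empty := rfl
  rw [hempty, hf]
  unfold pvMirror
  simp only [List.map_map]
  apply List.map_congr_left
  intro p hp
  simp only [Function.comp]
  rw [pvFmt_eq p.2 (hne p hp)]
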